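-- pv_equiv track=rewrite | github.com/arneschlag/bachlorthesis | configs/bachelorthesis/small_scripts/mlflowgrabber.py | train_dataset
-- ===== SOURCE A (Python) =====
-- def is_aux_task(text: str):
--     return text in ["kp2d", "kp3d"]
--
-- def train_dataset(text: str):
--     elements = text.split('_')
--     elements.reverse()
--     cache = ""
--     for element in elements:
--         if not is_aux_task(element):
--             if element in ['A', 'S']:
--                 if len(cache) == 0:
--                     cache = f'_{element}'
--                 else:
--                     cache = f'_{element}{cache}'
--             else:
--                 return element+cache
--     return None
-- ===== SOURCE B (Python) =====
-- def train_dataset(text: str):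
--     elements = [e for e in text.split('_') if e not in ('kp2d', 'kp3d')]
--     n = len(elements)
--     while n > 0 and elements[n - 1] in ('A', 'S'):
--         n -= 1
--     if n == 0:
--         return None
--     return '_'.join(elements[n - 1:])
-- ===== Notes on version B (the rewrite author's own statement) =====
-- stated objective: simpler
-- what changed: Replaces the reverse-and-accumulate loop (string cache grown through branched f-string prepends, early return) with a comprehension that filters out the aux tokens once, a backward trim of the trailing 'A'/'S' run, and a single slice-join.
import Mathlib
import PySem

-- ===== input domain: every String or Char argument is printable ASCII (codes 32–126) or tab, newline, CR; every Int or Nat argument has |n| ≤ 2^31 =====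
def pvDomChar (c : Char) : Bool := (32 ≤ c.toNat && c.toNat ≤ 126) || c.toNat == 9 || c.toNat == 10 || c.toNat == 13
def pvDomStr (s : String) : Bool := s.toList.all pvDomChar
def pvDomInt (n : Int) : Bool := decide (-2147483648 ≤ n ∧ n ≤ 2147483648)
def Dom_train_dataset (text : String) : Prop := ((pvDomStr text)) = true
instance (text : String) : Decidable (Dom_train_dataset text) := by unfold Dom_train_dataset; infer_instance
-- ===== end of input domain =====

-- B replaces A's reverse-and-accumulate loop (cache string, early return) with filter-once,
-- trim the trailing 'A'/'S' run from the right, then slice-and-join: simpler decomposition, same cost.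


-- ===== PORT A =====
def is_aux_task (text : String) : Bool := text == "kp2d" || text == "kp3d"

def trainGoA : List String → String → Option String
  | [], _ => none
  | e :: rest, cache =>
    if is_aux_task e then trainGoA rest cache
    else if e == "A" || e == "S" then
      (if cache.length = 0 then trainGoA rest ("_" ++ e)
       else trainGoA rest ("_" ++ e ++ cache))
    else some (e ++ cache)

def train_dataset (text : String) : Option String :=
  match PySem.Str.split? text "_" with
  | some elements => trainGoA elements.reverse ""
  | none => none   -- unreachable: the separator "_" is a nonempty literal

-- ===== PORT B =====
-- the while-loop 'while n > 0 and elements[n-1] in ("A","S"): n -= 1', as recursion on n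
def altTrim (elements : List String) : Nat → Nat
  | 0 => 0
  | m + 1 =>
    match elements[m]? with
    | some e => if e == "A" || e == "S" then altTrim elements m else m + 1
    | none => m + 1   -- unreachable: the index is always in range

def train_dataset_alt (text : String) : Option String :=
  match PySem.Str.split? text "_" with
  | some es =>
    let elements := es.filter (fun e => !(e == "kp2d" || e == "kp3d"))
    let n := altTrim elements elements.length
    if n = 0 then none
    else some (PySem.Str.join "_" (elements.drop (n - 1)))
  | none => none   -- unreachable: the separator "_" is a nonempty literal

-- ===== PRECONDITION & SPEC =====
def Spec_train_dataset (text : String) (out : Option String) : Prop := out = train_dataset_alt text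
instance (text : String) (out : Option String) : Decidable (Spec_train_dataset text out) := by unfold Spec_train_dataset; infer_instance

-- ===== CLAIM (what is proved, stated in full; the proofs are below) =====
def Claim_equal_train_dataset : Prop := ∀ (text : String), Dom_train_dataset text → Spec_train_dataset text (train_dataset text)

-- ===== LEMMAS AND PROOFS =====

-- the cache string A accumulates over a run of 'A'/'S' tokens taken in traversal order
def pvJ : List String → String
  | [] => ""
  | e :: pre => pvJ pre ++ "_" ++ e

-- first non-'A'/'S' token of a list together with the 'A'/'S' run before it
def pvPeel : List String → Option (String × List String)
  | [] => none
  | e :: r =>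
    if e == "A" || e == "S" then (pvPeel r).map (fun p => (p.1, e :: p.2))
    else some (e, [])

-- length of the leading 'A'/'S' run
def pvRun : List String → Nat
  | [] => 0
  | e :: r => if e == "A" || e == "S" then pvRun r + 1 else 0

theorem pvRun_le (r : List String) : pvRun r ≤ r.length := by
  induction r with
  | nil => simp [pvRun]
  | cons e r ih => simp only [pvRun, List.length_cons]; split <;> omega

theorem pvPeel_none_iff (r : List String) : pvPeel r = none ↔ pvRun r = r.length := by
  induction r with
  | nil => simp [pvPeel, pvRun]
  | cons e r ih =>
    simp only [pvPeel, pvRun, List.length_cons]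
    split
    · cases hp : pvPeel r <;> simp [hp] at ih ⊢ <;> omega
    · have := pvRun_le r
      constructor
      · intro h; exact absurd h (by simp)
      · intro h; omega

theorem cjoin_append_singleton (sep : List Char) (xs : List (List Char)) (e : List Char) (h : xs ≠ []) :
    PySem.Chars.join sep (xs ++ [e]) = PySem.Chars.join sep xs ++ sep ++ e := by
  induction xs with
  | nil => simp at h
  | cons a xs ih =>
    cases xs with
    | nil => simp [PySem.Chars.join_cons_cons, PySem.Chars.join_singleton]
    | cons b ys =>
      rw [List.cons_append, List.cons_append, PySem.Chars.join_cons_cons,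
        PySem.Chars.join_cons_cons, ← List.cons_append, ih (by simp)]
      simp [List.append_assoc]

theorem sjoin_append_singleton (xs : List String) (e : String) (h : xs ≠ []) :
    PySem.Str.join "_" (xs ++ [e]) = PySem.Str.join "_" xs ++ "_" ++ e := by
  apply String.toList_inj.mp
  simp only [PySem.Str.toList_join, String.toList_append, List.map_append, List.map_cons, List.map_nil]
  exact cjoin_append_singleton _ _ _ (by simpa using h)

theorem sjoin_singleton (e : String) : PySem.Str.join "_" [e] = e := by
  apply String.toList_inj.mp
  simp [PySem.Str.toList_join, PySem.Chars.join_singleton]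

-- characterisation of A's loop: skip aux tokens, peel the leading A/S run off the reversed list
theorem trainGoA_eq_peel (r : List String) :
    ∀ cache, trainGoA r cache =
      match pvPeel (r.filter (fun e => !is_aux_task e)) with
      | none => none
      | some (e, pre) => some (e ++ pvJ pre ++ cache) := by
  induction r with
  | nil => intro cache; simp [trainGoA, pvPeel]
  | cons e r ih =>
    intro cache
    by_cases haux : is_aux_task e = true
    · simp [trainGoA, haux, ih]
    · by_cases has : (e == "A" || e == "S") = true
      · have hstep : trainGoA (e :: r) cache = trainGoA r ("_" ++ e ++ cache) := by
          by_cases hc : cache.length = 0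
          · have : cache = "" := String.length_eq_zero_iff.mp hc
            subst this
            simp [trainGoA, haux, has, hc, String.append_empty]
          · simp [trainGoA, haux, has, hc]
        rw [hstep, ih]
        simp only [List.filter_cons, haux, Bool.not_false, pvPeel, has, if_pos]
        cases hp : pvPeel (r.filter (fun e => !is_aux_task e)) with
        | none => simp
        | some p => simp [pvJ, String.append_assoc]
      · simp [trainGoA, haux, has, pvPeel, pvJ, String.append_empty]

theorem altTrim_prefix (n : Nat) (l t : List String) (h : n ≤ l.length) :
    altTrim (l ++ t) n = altTrim l n := by
  induction n with
  | zero => rfl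
  | succ m ih =>
    simp only [altTrim, List.getElem?_append_left (show m < l.length by omega)]
    cases l[m]? with
    | none => rfl
    | some e => split <;> simp [ih (by omega)]

theorem altTrim_eq (l : List String) : altTrim l l.length = l.length - pvRun l.reverse := by
  induction l using List.reverseRecOn with
  | nil => rfl
  | append_singleton l e ih =>
    have hlen : (l ++ [e]).length = l.length + 1 := by simp
    rw [hlen]
    simp only [altTrim, List.getElem?_concat_length]
    have hrev : (l ++ [e]).reverse = e :: l.reverse := by simp
    rw [hrev]
    simp only [pvRun]
    split
    · rw [altTrim_prefix l.length l [e] (le_refl _), ih]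
      have := pvRun_le l.reverse
      simp at this
      omega
    · simp

-- characterisation of B's result in terms of the peeled reversed list
theorem linkR (r : List String) :
    (match pvPeel r with
     | none => (none : Option String)
     | some (e, pre) => some (e ++ pvJ pre))
    = if r.length - pvRun r = 0 then none
      else some (PySem.Str.join "_" (r.reverse.drop (r.length - pvRun r - 1))) := by
  induction r with
  | nil => simp [pvPeel, pvRun]
  | cons e r ih =>
    by_cases has : (e == "A" || e == "S") = true
    · simp only [pvPeel, pvRun, has, if_pos, List.length_cons]
      have hle := pvRun_le r
      have harith : r.length + 1 - (pvRun r + 1) = r.length - pvRun r := by omega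
      rw [harith]
      by_cases hn : r.length - pvRun r = 0
      · have : pvPeel r = none := (pvPeel_none_iff r).mpr (by omega)
        simp [this, hn]
      · cases hp : pvPeel r with
        | none => exact absurd ((pvPeel_none_iff r).mp hp) (by omega)
        | some p =>
          obtain ⟨e', pre⟩ := p
          rw [hp] at ih
          simp only [hn, if_false] at ih ⊢
          have hval : e' ++ pvJ pre = PySem.Str.join "_" (r.reverse.drop (r.length - pvRun r - 1)) := by
            simpa [hn] using ih
          have hdrop : (e :: r).reverse.drop (r.length - pvRun r - 1)
              = r.reverse.drop (r.length - pvRun r - 1) ++ [e] := by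
            rw [List.reverse_cons, List.drop_append_of_le_length (by simp; omega)]
          have hne : r.reverse.drop (r.length - pvRun r - 1) ≠ [] := by
            intro hnil
            have := List.drop_eq_nil_iff.mp hnil
            simp at this
            omega
          rw [hdrop, sjoin_append_singleton _ _ hne, ← hval]
          simp [pvJ, String.append_assoc]
    · simp only [pvPeel, pvRun, has, if_neg, Bool.not_eq_true] at *
      simp [sjoin_singleton, pvJ, String.append_empty]

-- ===== VERDICT (by name: the statement is the Claim_ definition above) =====
theorem train_dataset_spec : Claim_equal_train_dataset := by
  intro text _
  show train_dataset text = train_dataset_alt text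
  unfold train_dataset train_dataset_alt
  cases hs : PySem.Str.split? text "_" with
  | none => rfl
  | some es =>
    simp only
    rw [trainGoA_eq_peel, List.filter_reverse]
    have hlink := linkR (es.filter (fun e => !is_aux_task e)).reverse
    simp only [List.reverse_reverse, List.length_reverse] at hlink
    have hpred : (fun e : String => !is_aux_task e) = (fun e : String => !(e == "kp2d" || e == "kp3d")) := rfl
    rw [hpred] at hlink ⊢
    simp only [String.append_empty]
    rw [hlink, altTrim_eq]
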